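-- pv_equiv track=rewrite | github.com/Tulpana/ARC-AGI-2 | arc_agi_2_submission/ril/solver.py | translate_object_to
-- ===== SOURCE A (Python) =====
-- from typing import Iterable, List, Dict, Tuple, Any, Optional, Sequence, Set, Mapping
-- from collections import Counter, deque
--
-- Grid = List[List[int]]
--
-- def grid_shape(g: Grid) -> Tuple[int, int]:
--     return (len(g), len(g[0]) if g else 0)
--
-- def in_bounds(r: int, c: int, h: int, w: int) -> bool:
--     return 0 <= r < h and 0 <= c < w
--
-- def copy_grid(g: Grid) -> Grid:
--     return [row[:] for row in g]
--
-- def mode_color(g: Grid) -> int: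
--     cnt = Counter(cell for row in g for cell in row)
--     return cnt.most_common(1)[0][0] if cnt else 0
--
-- def connected_components(g: Grid, bg: Optional[int] = None) -> List[List[Tuple[int,int]]]:
--     """4-neighborhood components of non-bg cells."""
--     if not g or not g[0]: return []
--     H, W = len(g), len(g[0])
--     seen = [[False]*W for _ in range(H)]
--     comps = []
--     for r in range(H):
--         for c in range(W):
--             if seen[r][c]: continue
--             val = g[r][c]
--             if bg is not None and val == bg:
--                 seen[r][c] = True
--                 continue
--             if bg is None and val == 0:  # default: treat 0 as bg if not specified
--                 seen[r][c] = True
--                 continue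
--             # BFS
--             if (bg is None and val != 0) or (bg is not None and val != bg):
--                 q = deque([(r,c)])
--                 seen[r][c] = True
--                 comp = []
--                 while q:
--                     rr, cc = q.popleft()
--                     comp.append((rr,cc))
--                     for dr, dc in ((1,0),(-1,0),(0,1),(0,-1)):
--                         nr, nc = rr+dr, cc+dc
--                         if in_bounds(nr,nc,H,W) and not seen[nr][nc]:
--                             if (bg is None and g[nr][nc] != 0) or (bg is not None and g[nr][nc] != bg):
--                                 seen[nr][nc] = True
--                                 q.append((nr,nc))
--                             else:
--                                 seen[nr][nc] = True  # mark bg as seen so we don't revisit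
--                 comps.append(comp)
--             else:
--                 seen[r][c] = True
--     return comps
--
-- def crop_to_bbox(g: Grid, cells: List[Tuple[int,int]]) -> Grid:
--     if not cells: return [[]]
--     rs = [r for r,_ in cells]
--     cs = [c for _,c in cells]
--     r0, r1 = min(rs), max(rs)
--     c0, c1 = min(cs), max(cs)
--     return [row[c0:c1+1] for row in g[r0:r1+1]]
--
-- def paste_at(dst: Grid, patch: Grid, top: int, left: int) -> Grid:
--     H, W = len(dst), (len(dst[0]) if dst else 0)
--     h, w = len(patch), (len(patch[0]) if patch else 0)
--     out = copy_grid(dst)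
--     for i in range(h):
--         for j in range(w):
--             rr, cc = top+i, left+j
--             if in_bounds(rr, cc, H, W):
--                 out[rr][cc] = patch[i][j]
--     return out
--
-- def translate_object_to(g: Grid, dest: str = "topleft", bg: Optional[int] = None) -> Grid:
--     """Move largest component to a position (topleft|center)."""
--     if not g or not g[0]: return g
--     H, W = grid_shape(g)
--     bgc = bg if bg is not None else mode_color(g)
--     comps = connected_components(g, bg=bgc)
--     if not comps: return g
--     # pick largest comp
--     largest = max(comps, key=len)
--     obj = crop_to_bbox(g, largest)
--     oh, ow = grid_shape(obj)
--     out = [[bgc for _ in range(W)] for __ in range(H)]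
--     if dest == "topleft":
--         return paste_at(out, obj, 0, 0)
--     # center
--     top = max(0, (H - oh)//2)
--     left = max(0, (W - ow)//2)
--     return paste_at(out, obj, top, left)
-- ===== SOURCE B (Python) =====
-- from typing import List, Tuple, Optional
-- from collections import Counter
--
-- Grid = List[List[int]]
--
-- def grid_shape(g: Grid) -> Tuple[int, int]:
--     return (len(g), len(g[0]) if g else 0)
--
-- def in_bounds(r: int, c: int, h: int, w: int) -> bool:
--     return 0 <= r < h and 0 <= c < w
--
-- def copy_grid(g: Grid) -> Grid:
--     return [row[:] for row in g]
--
-- def mode_color(g: Grid) -> int: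
--     cnt = Counter(cell for row in g for cell in row)
--     return cnt.most_common(1)[0][0] if cnt else 0
--
-- def connected_components(g: Grid, bg: Optional[int] = None) -> List[List[Tuple[int,int]]]:
--     """4-neighborhood components of non-bg cells, by synchronous min-label
--     propagation (no queue, no seen matrix, no per-seed search): every non-bg
--     cell starts labelled with its own flattened index; in rounds, each cell
--     replaces its label by the minimum over itself and its non-bg 4-neighbours,
--     until the labelling is stable.  At the fixpoint two cells carry the same
--     label iff they are 4-connected, so grouping the cells by label (row-major,
--     first label seen first) yields exactly the components in first-seen order."""
--     if not g or not g[0]: return []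
--     H, W = len(g), len(g[0])
--     bgv = bg if bg is not None else 0   # default: treat 0 as bg, as in the scan version
--     lab = {}
--     for r in range(H):
--         for c in range(W):
--             if g[r][c] != bgv:
--                 lab[(r, c)] = r * W + c
--     while True:
--         new = {}
--         for (r, c), v in lab.items():
--             m = v
--             for q in ((r + 1, c), (r - 1, c), (r, c + 1), (r, c - 1)):
--                 if q in lab and lab[q] < m:
--                     m = lab[q]
--             new[(r, c)] = m
--         if new == lab:
--             break
--         lab = new
--     groups = {}
--     for cell, root in lab.items():          # row-major insertion order
--         groups[root] = groups.get(root, []) + [cell]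
--     return list(groups.values())
--
-- def crop_to_bbox(g: Grid, cells: List[Tuple[int,int]]) -> Grid:
--     if not cells: return [[]]
--     rs = [r for r,_ in cells]
--     cs = [c for _,c in cells]
--     r0, r1 = min(rs), max(rs)
--     c0, c1 = min(cs), max(cs)
--     return [row[c0:c1+1] for row in g[r0:r1+1]]
--
-- def paste_at(dst: Grid, patch: Grid, top: int, left: int) -> Grid:
--     H, W = len(dst), (len(dst[0]) if dst else 0)
--     h, w = len(patch), (len(patch[0]) if patch else 0)
--     out = copy_grid(dst)
--     for i in range(h):
--         for j in range(w):
--             rr, cc = top+i, left+j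
--             if in_bounds(rr, cc, H, W):
--                 out[rr][cc] = patch[i][j]
--     return out
--
-- def translate_object_to(g: Grid, dest: str = "topleft", bg: Optional[int] = None) -> Grid:
--     """Move largest component to a position (topleft|center)."""
--     if not g or not g[0]: return g
--     H, W = grid_shape(g)
--     bgc = bg if bg is not None else mode_color(g)
--     comps = connected_components(g, bg=bgc)
--     if not comps: return g
--     largest = max(comps, key=len)
--     obj = crop_to_bbox(g, largest)
--     oh, ow = grid_shape(obj)
--     out = [[bgc for _ in range(W)] for __ in range(H)]
--     if dest == "topleft":
--         return paste_at(out, obj, 0, 0)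
--     top = max(0, (H - oh)//2)
--     left = max(0, (W - ow)//2)
--     return paste_at(out, obj, top, left)
-- ===== Notes on version B (the rewrite author's own statement) =====
-- stated objective: alternative
-- what changed: connected_components is re-implemented by synchronous min-label propagation: every non-bg cell starts labelled with its own flattened index, each round every cell takes the minimum label among itself and its non-bg 4-neighbours until the labelling is stable, and cells are then grouped by their fixpoint label in row-major first-seen order - no BFS queue, no seen matrix, no per-seed search; the largest-component selection, crop and paste pipeline is unchanged.
import Mathlib
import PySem

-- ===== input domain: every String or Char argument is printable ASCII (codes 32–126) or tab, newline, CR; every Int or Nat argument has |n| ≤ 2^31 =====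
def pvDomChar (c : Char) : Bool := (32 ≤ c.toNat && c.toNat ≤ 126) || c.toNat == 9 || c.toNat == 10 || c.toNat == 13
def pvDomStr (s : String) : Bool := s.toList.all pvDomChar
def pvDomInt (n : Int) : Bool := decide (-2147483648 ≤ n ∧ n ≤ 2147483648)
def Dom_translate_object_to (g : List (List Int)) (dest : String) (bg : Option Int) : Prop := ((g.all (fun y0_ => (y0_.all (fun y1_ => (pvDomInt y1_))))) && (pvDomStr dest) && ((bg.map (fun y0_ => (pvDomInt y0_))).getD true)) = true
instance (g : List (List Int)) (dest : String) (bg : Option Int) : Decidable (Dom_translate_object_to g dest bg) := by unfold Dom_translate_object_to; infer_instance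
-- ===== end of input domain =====

-- B replaces the BFS flood fill of connected_components by synchronous min-label
-- propagation to a fixpoint followed by one grouping pass; the selection/crop/paste
-- pipeline is unchanged. Equivalence of the RETURN value is proved on Pre_ (A raises elsewhere).

-- ===== shared helpers (used by both ports, as in both Python modules) =====
def pvInb (r c H W : Int) : Bool := decide (0 ≤ r ∧ r < H ∧ 0 ≤ c ∧ c < W)

def pvVal (g : List (List Int)) (r c : Int) : Int :=
  PySem.List.pyGetD (PySem.List.pyGetD g r []) c 0   -- g[r][c]; total form, exact under Pre_ (in-bounds guarded accesses)

-- the repeated Python idiom "(bg is None and v != 0) or (bg is not None and v != bg)"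
def pvIsFg (bg : Option Int) (v : Int) : Bool :=
  match bg with
  | some b => v != b
  | none   => v != 0

def pvDirs : List (Int × Int) := [(1,0),(-1,0),(0,1),(0,-1)]

-- the row-major cell scan "for r in range(H): for c in range(W):"
def pvAll (H W : Int) : List (Int × Int) :=
  (PySem.List.pyRange 0 H 1).flatMap (fun r => (PySem.List.pyRange 0 W 1).map (fun c => (r, c)))

lemma mem_pvAll {H W : Int} {p : Int × Int} :
    p ∈ pvAll H W ↔ (0 ≤ p.1 ∧ p.1 < H ∧ 0 ≤ p.2 ∧ p.2 < W) := by
  obtain ⟨a, b⟩ := p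
  simp only [pvAll, List.mem_flatMap, List.mem_map, PySem.List.mem_pyRange_one, Prod.mk.injEq]
  constructor
  · rintro ⟨r, hr, c, hc, h1, h2⟩
    subst h1; subst h2; exact ⟨hr.1, hr.2, hc.1, hc.2⟩
  · rintro ⟨h1, h2, h3, h4⟩
    exact ⟨a, ⟨h1, h2⟩, b, ⟨h3, h4⟩, rfl, rfl⟩

-- count of cells not yet marked: the termination measure of A's BFS loop
def pvCu (H W : Int) (seen : List (Int × Int)) : Nat :=
  ((pvAll H W).filter (fun p => decide (p ∉ seen))).length

lemma pvCu_lt {H W : Int} {s t : List (Int × Int)} (hsub : ∀ x ∈ s, x ∈ t)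
    {e : Int × Int} (he1 : e ∈ pvAll H W) (he2 : e ∈ t) (he3 : e ∉ s) :
    pvCu H W t < pvCu H W s := by
  have hsl : List.Sublist ((pvAll H W).filter (fun p => decide (p ∉ t))) ((pvAll H W).filter (fun p => decide (p ∉ s))) := by
    apply List.monotone_filter_right
    intro a ha
    simp only [decide_eq_true_eq] at *
    exact fun hs => ha (hsub a hs)
  refine Nat.lt_of_le_of_ne hsl.length_le fun hlen => ?_
  have := hsl.eq_of_length hlen
  have he : e ∈ (pvAll H W).filter (fun p => decide (p ∉ s)) := by
    simp [List.mem_filter, he1, he3]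
  rw [← this] at he
  simp [List.mem_filter] at he
  exact he.2 he2

def pvModeColor (g : List (List Int)) : Int :=
  let flat := g.flatMap (fun row => row)
  let cnt := PySem.Dict.counter flat
  match PySem.List.max? cnt.items (fun p => p.2) with
  | some p => p.1
  | none => 0

def pvCrop (g : List (List Int)) (cells : List (Int × Int)) : List (List Int) :=
  if cells = [] then [[]] else
  let rs := cells.map (·.1)
  let cs := cells.map (·.2)
  let r0 := (PySem.List.min? rs (fun x => x)).getD 0
  let r1 := (PySem.List.max? rs (fun x => x)).getD 0
  let c0 := (PySem.List.min? cs (fun x => x)).getD 0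
  let c1 := (PySem.List.max? cs (fun x => x)).getD 0
  (PySem.List.slice g (some r0) (some (r1+1))).map (fun row => PySem.List.slice row (some c0) (some (c1+1)))

def pvPaste (dst patch : List (List Int)) (top left : Int) : List (List Int) :=
  let H : Int := dst.length
  let W : Int := (dst.headI).length
  let h : Int := patch.length
  let w : Int := (patch.headI).length
  (PySem.List.pyRange 0 h 1).foldl (fun out i =>
    (PySem.List.pyRange 0 w 1).foldl (fun out j =>
      let rr := top + i
      let cc := left + j
      if pvInb rr cc H W then
        PySem.List.pySetD out rr (PySem.List.pySetD (PySem.List.pyGetD out rr []) cc (pvVal patch i j))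
      else out) out) dst

-- ===== PORT A =====
def pvVisit (g : List (List Int)) (H W : Int) (bg : Option Int) (x : Int × Int)
    (st : List (Int × Int) × List (Int × Int)) (d : Int × Int) :
    List (Int × Int) × List (Int × Int) :=
  let n : Int × Int := (x.1 + d.1, x.2 + d.2)
  if pvInb n.1 n.2 H W = true ∧ n ∉ st.1 then
    if pvIsFg bg (pvVal g n.1 n.2) then (n :: st.1, st.2 ++ [n])
    else (n :: st.1, st.2)
  else st

lemma pvVisit_measure_le (g : List (List Int)) (H W : Int) (bg : Option Int) (x : Int × Int)
    (st : List (Int × Int) × List (Int × Int)) (d : Int × Int) :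
    pvCu H W (pvVisit g H W bg x st d).1 + (pvVisit g H W bg x st d).2.length ≤
      pvCu H W st.1 + st.2.length := by
  unfold pvVisit
  by_cases h1 : pvInb (x.1 + d.1) (x.2 + d.2) H W = true ∧ (x.1 + d.1, x.2 + d.2) ∉ st.1
  · have hmem : ((x.1 + d.1, x.2 + d.2) : Int × Int) ∈ pvAll H W := by
      have h1' := h1.1
      simp only [pvInb, decide_eq_true_eq] at h1'
      exact mem_pvAll.mpr h1'
    have hlt : pvCu H W ((x.1 + d.1, x.2 + d.2) :: st.1) < pvCu H W st.1 :=
      pvCu_lt (fun y hy => List.mem_cons_of_mem _ hy) hmem (by simp) h1.2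
    by_cases h2 : pvIsFg bg (pvVal g (x.1 + d.1) (x.2 + d.2)) = true
    · rw [if_pos h1, if_pos h2]
      simp only [List.length_append, List.length_cons, List.length_nil]
      omega
    · rw [if_pos h1, if_neg h2]
      simp only []
      omega
  · rw [if_neg h1]

lemma pvFoldVisit_measure_le (g : List (List Int)) (H W : Int) (bg : Option Int) (x : Int × Int)
    (ds : List (Int × Int)) (st : List (Int × Int) × List (Int × Int)) :
    pvCu H W (ds.foldl (pvVisit g H W bg x) st).1 + (ds.foldl (pvVisit g H W bg x) st).2.length ≤
      pvCu H W st.1 + st.2.length := by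
  induction ds generalizing st with
  | nil => simp [List.foldl]
  | cons e es ih =>
      simp only [List.foldl_cons]
      exact Nat.le_trans (ih (pvVisit g H W bg x st e)) (pvVisit_measure_le g H W bg x st e)

def pvBfs (g : List (List Int)) (H W : Int) (bg : Option Int) :
    List (Int × Int) → List (Int × Int) → List (Int × Int) →
    List (Int × Int) × List (Int × Int)
  | [], seen, comp => (comp, seen)
  | x :: q, seen, comp =>
      let st := pvDirs.foldl (pvVisit g H W bg x) (seen, q)
      pvBfs g H W bg st.2 st.1 (comp ++ [x])
  termination_by q seen _ => pvCu H W seen + q.length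
  decreasing_by
    have h := pvFoldVisit_measure_le g H W bg x pvDirs (seen, q)
    have h' : pvCu H W seen + q.length < pvCu H W seen + (x :: q).length := by
      simp only [List.length_cons]; omega
    exact Nat.lt_of_le_of_lt h h'

def pvScanCellA (g : List (List Int)) (H W : Int) (bg : Option Int)
    (st : List (Int × Int) × List (List (Int × Int))) (p : Int × Int) :
    List (Int × Int) × List (List (Int × Int)) :=
  if p ∈ st.1 then st
  else if pvIsFg bg (pvVal g p.1 p.2) = false then (p :: st.1, st.2)
  else
    let r := pvBfs g H W bg [p] (p :: st.1) []
    (r.2, st.2 ++ [r.1])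

def pvComps (g : List (List Int)) (bg : Option Int) : List (List (Int × Int)) :=
  if g.length = 0 ∨ (g.headI).length = 0 then [] else
  let H : Int := g.length
  let W : Int := (g.headI).length
  ((pvAll H W).foldl (pvScanCellA g H W bg) ([], [])).2

def translate_object_to (g : List (List Int)) (dest : String) (bg : Option Int) : List (List Int) :=
  if g.length = 0 ∨ (g.headI).length = 0 then g else
  let H : Int := g.length
  let W : Int := (g.headI).length
  let bgc : Int := match bg with | some b => b | none => pvModeColor g
  let comps := pvComps g (some bgc)
  if comps = [] then g else
  let largest := (PySem.List.max? comps (fun c => c.length)).getD []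
  let obj := pvCrop g largest
  let oh : Int := obj.length
  let ow : Int := (obj.headI).length
  let out : List (List Int) :=
    (PySem.List.pyRange 0 H 1).map (fun _ => (PySem.List.pyRange 0 W 1).map (fun _ => bgc))
  if dest = "topleft" then pvPaste out obj 0 0
  else
    let top := max 0 (PySem.Int.floordiv (H - oh) 2)
    let left := max 0 (PySem.Int.floordiv (W - ow) 2)
    pvPaste out obj top left

-- ===== PORT B =====
-- the neighbour tuple ((r+1,c),(r-1,c),(r,c+1),(r,c-1)) of Source B
def pvNbrs4 (p : Int × Int) : List (Int × Int) :=
  [(p.1 + 1, p.2), (p.1 - 1, p.2), (p.1, p.2 + 1), (p.1, p.2 - 1)]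

-- "m = v; for q in nbrs: if q in lab and lab[q] < m: m = lab[q]"
def pvRelax (lab : PySem.Dict (Int × Int) Int) (p : Int × Int) (v : Int) : Int :=
  (pvNbrs4 p).foldl (fun m q =>
    match lab.get? q with
    | some w => if w < m then w else m
    | none => m) v

-- one synchronous round: "new = {}; for (r,c), v in lab.items(): new[(r,c)] = m"
def pvStepLab (lab : PySem.Dict (Int × Int) Int) : PySem.Dict (Int × Int) Int :=
  lab.items.foldl (fun d x => d.insert x.1 (pvRelax lab x.1 x.2)) PySem.Dict.empty

-- the while-loop "new = step(lab); if new == lab: break; lab = new", ported with fuel.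
-- (pvStepLab keeps the keys in the same order, so Python's order-insensitive dict ==
-- coincides with Dict equality here; each changed round strictly decreases the sum of
-- the nonnegative labels, so the fuel passed in pvCompsB provably reaches the fixpoint.)
def pvIterLab : Nat → PySem.Dict (Int × Int) Int → PySem.Dict (Int × Int) Int
  | 0, lab => lab
  | fuel + 1, lab =>
      let new := pvStepLab lab
      if new = lab then lab else pvIterLab fuel new

def pvCompsB (g : List (List Int)) (bg : Option Int) : List (List (Int × Int)) :=
  if g.length = 0 ∨ (g.headI).length = 0 then [] else
  let H : Int := g.length
  let W : Int := (g.headI).length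
  let bgv : Int := match bg with | some b => b | none => 0
  let lab0 := (pvAll H W).foldl
    (fun d p => if pvVal g p.1 p.2 ≠ bgv then d.insert p (p.1 * W + p.2) else d)
    PySem.Dict.empty
  let lab := pvIterLab ((lab0.values.map Int.toNat).sum + 1) lab0
  let groups := lab.items.foldl
    (fun d x => d.modify x.2 [] (· ++ [x.1])) PySem.Dict.empty
  groups.values

def translate_object_to_alt (g : List (List Int)) (dest : String) (bg : Option Int) : List (List Int) :=
  if g.length = 0 ∨ (g.headI).length = 0 then g else
  let H : Int := g.length
  let W : Int := (g.headI).length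
  let bgc : Int := match bg with | some b => b | none => pvModeColor g
  let comps := pvCompsB g (some bgc)
  if comps = [] then g else
  let largest := (PySem.List.max? comps (fun c => c.length)).getD []
  let obj := pvCrop g largest
  let oh : Int := obj.length
  let ow : Int := (obj.headI).length
  let out : List (List Int) :=
    (PySem.List.pyRange 0 H 1).map (fun _ => (PySem.List.pyRange 0 W 1).map (fun _ => bgc))
  if dest = "topleft" then pvPaste out obj 0 0
  else
    let top := max 0 (PySem.Int.floordiv (H - oh) 2)
    let left := max 0 (PySem.Int.floordiv (W - ow) 2)
    pvPaste out obj top left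

-- ===== PRECONDITION & SPEC =====
-- Pre_ excludes exactly the grids on which the Python A raises IndexError: a nonempty grid
-- with a nonempty first row but some later row shorter than the first (the scan indexes
-- every column of every row up to len(g[0])). B raises there too; no returning input is excluded.
def Pre_translate_object_to (g : List (List Int)) (dest : String) (bg : Option Int) : Prop :=
  g = [] ∨ g.headI = [] ∨ ∀ row ∈ g, (g.headI).length ≤ row.length
instance (g : List (List Int)) (dest : String) (bg : Option Int) : Decidable (Pre_translate_object_to g dest bg) := by unfold Pre_translate_object_to; infer_instance

def pvWitness_translate_object_to : List (List Int) × String × Option Int :=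
  ([[1, 0], [0, 1]], "topleft", some 0)

def Spec_translate_object_to (g : List (List Int)) (dest : String) (bg : Option Int) (out : List (List Int)) : Prop := out = translate_object_to_alt g dest bg
instance (g : List (List Int)) (dest : String) (bg : Option Int) (out : List (List Int)) : Decidable (Spec_translate_object_to g dest bg out) := by unfold Spec_translate_object_to; infer_instance

-- ===== CLAIM (what is proved, stated in full; the proofs are below) =====
def Claim_equal_translate_object_to : Prop := ∀ (g : List (List Int)) (dest : String) (bg : Option Int), Dom_translate_object_to g dest bg → Pre_translate_object_to g dest bg → Spec_translate_object_to g dest bg (translate_object_to g dest bg)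

-- ===== LEMMAS AND PROOFS =====

def pvNbrs (p : Int × Int) : List (Int × Int) := pvDirs.map (fun d => (p.1 + d.1, p.2 + d.2))

lemma pvNbrs_eq (p : Int × Int) : pvNbrs p = pvNbrs4 p := by
  simp [pvNbrs, pvNbrs4, pvDirs, sub_eq_add_neg]

def pvOkB (g : List (List Int)) (H W : Int) (bg : Option Int) (p : Int × Int) : Bool :=
  pvInb p.1 p.2 H W && pvIsFg bg (pvVal g p.1 p.2)

def pvStep (g : List (List Int)) (H W : Int) (bg : Option Int) (p q : Int × Int) : Prop :=
  pvOkB g H W bg p = true ∧ pvOkB g H W bg q = true ∧ q ∈ pvNbrs p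

def pvReach (g : List (List Int)) (H W : Int) (bg : Option Int) (s x : Int × Int) : Prop :=
  Relation.ReflTransGen (pvStep g H W bg) s x

def CompEq (c1 c2 : List (Int × Int)) : Prop :=
  c1.Nodup ∧ c2.Nodup ∧ ∀ x, x ∈ c1 ↔ x ∈ c2


lemma pvStep_symm {g : List (List Int)} {H W : Int} {bg : Option Int} :
    Symmetric (pvStep g H W bg) := by
  rintro ⟨a1, a2⟩ ⟨b1, b2⟩ ⟨ha, hb, hmem⟩
  refine ⟨hb, ha, ?_⟩
  simp only [pvNbrs, List.mem_map] at hmem ⊢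
  obtain ⟨d, hd, hEq⟩ := hmem
  have hd' : d = ((1:Int),(0:Int)) ∨ d = (-1,0) ∨ d = (0,1) ∨ d = (0,-1) := by
    simpa [pvDirs] using hd
  rcases hd' with rfl | rfl | rfl | rfl
  · refine ⟨(-1,0), by simp [pvDirs], ?_⟩
    simp only [Prod.ext_iff] at hEq ⊢
    exact ⟨by omega, by omega⟩
  · refine ⟨(1,0), by simp [pvDirs], ?_⟩
    simp only [Prod.ext_iff] at hEq ⊢
    exact ⟨by omega, by omega⟩
  · refine ⟨(0,-1), by simp [pvDirs], ?_⟩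
    simp only [Prod.ext_iff] at hEq ⊢
    exact ⟨by omega, by omega⟩
  · refine ⟨(0,1), by simp [pvDirs], ?_⟩
    simp only [Prod.ext_iff] at hEq ⊢
    exact ⟨by omega, by omega⟩

lemma pvReach_symm {g : List (List Int)} {H W : Int} {bg : Option Int} {a b : Int × Int}
    (h : pvReach g H W bg a b) : pvReach g H W bg b a :=
  Relation.ReflTransGen.symmetric pvStep_symm h

lemma pvReach_ok {g : List (List Int)} {H W : Int} {bg : Option Int} {s x : Int × Int}
    (hs : pvOkB g H W bg s = true) (h : pvReach g H W bg s x) : pvOkB g H W bg x = true := by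
  induction h with
  | refl => exact hs
  | tail _ h2 _ => exact h2.2.1

lemma pvFoldVisit_spec (g : List (List Int)) (H W : Int) (bg : Option Int) (x : Int × Int) :
    ∀ (ds : List (Int × Int)) (st : List (Int × Int) × List (Int × Int)),
    (∀ d ∈ ds, d ∈ pvDirs) →
    (∀ y ∈ st.1, y ∈ (ds.foldl (pvVisit g H W bg x) st).1) ∧
    (∀ d ∈ ds, pvInb (x.1 + d.1) (x.2 + d.2) H W = true →
        ((x.1 + d.1, x.2 + d.2) : Int × Int) ∈ (ds.foldl (pvVisit g H W bg x) st).1) ∧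
    (∃ add, (ds.foldl (pvVisit g H W bg x) st).2 = st.2 ++ add ∧ add.Nodup ∧
      (∀ y ∈ add, pvOkB g H W bg y = true ∧ y ∈ pvNbrs x ∧ y ∉ st.1 ∧
          y ∈ (ds.foldl (pvVisit g H W bg x) st).1) ∧
      (∀ y, pvOkB g H W bg y = true →
        (y ∈ (ds.foldl (pvVisit g H W bg x) st).1 ↔ y ∈ st.1 ∨ y ∈ add))) := by
  intro ds
  induction ds with
  | nil =>
      intro st _
      exact ⟨fun y hy => hy, by simp, [], by simp, by simp, by simp, fun y _ => by simp⟩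
  | cons d ds ih =>
      intro st hds
      have hdmem : d ∈ pvDirs := hds d (List.mem_cons_self ..)
      have hds' : ∀ e ∈ ds, e ∈ pvDirs := fun e he => hds e (List.mem_cons_of_mem _ he)
      simp only [List.foldl_cons]
      by_cases hc : pvInb (x.1 + d.1) (x.2 + d.2) H W = true ∧ ((x.1 + d.1, x.2 + d.2) : Int × Int) ∉ st.1
      · by_cases hfg : pvIsFg bg (pvVal g (x.1 + d.1) (x.2 + d.2)) = true
        · -- push
          have hvis : pvVisit g H W bg x st d =
              (((x.1 + d.1, x.2 + d.2) : Int × Int) :: st.1, st.2 ++ [((x.1 + d.1, x.2 + d.2) : Int × Int)]) := by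
            unfold pvVisit; rw [if_pos hc, if_pos hfg]
          rw [hvis]
          obtain ⟨mono1, h41, add1, heq1, hnd1, hprops1, hiff1⟩ :=
            ih (((x.1 + d.1, x.2 + d.2) : Int × Int) :: st.1, st.2 ++ [((x.1 + d.1, x.2 + d.2) : Int × Int)]) hds'
          have hnok : pvOkB g H W bg ((x.1 + d.1, x.2 + d.2) : Int × Int) = true := by
            simp only [pvOkB, Bool.and_eq_true]; exact ⟨hc.1, hfg⟩
          have hnnbr : ((x.1 + d.1, x.2 + d.2) : Int × Int) ∈ pvNbrs x :=
            List.mem_map.mpr ⟨d, hdmem, rfl⟩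
          have hnF : ((x.1 + d.1, x.2 + d.2) : Int × Int) ∈
              (ds.foldl (pvVisit g H W bg x) (((x.1 + d.1, x.2 + d.2) : Int × Int) :: st.1, st.2 ++ [((x.1 + d.1, x.2 + d.2) : Int × Int)])).1 :=
            mono1 _ (List.mem_cons_self ..)
          refine ⟨fun y hy => mono1 y (List.mem_cons_of_mem _ hy), ?_,
            ((x.1 + d.1, x.2 + d.2) : Int × Int) :: add1, by simp [heq1], ?_, ?_, ?_⟩
          · intro e he hinb
            rcases List.mem_cons.mp he with rfl | he'
            · exact hnF
            · exact h41 e he' hinb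
          · refine List.nodup_cons.mpr ⟨fun hmem => ?_, hnd1⟩
            exact (hprops1 _ hmem).2.2.1 (List.mem_cons_self ..)
          · intro y hy
            rcases List.mem_cons.mp hy with rfl | hy'
            · exact ⟨hnok, hnnbr, hc.2, hnF⟩
            · obtain ⟨h1, h2, h3, h4⟩ := hprops1 y hy'
              exact ⟨h1, h2, fun hmem => h3 (List.mem_cons_of_mem _ hmem), h4⟩
          · intro y hok
            rw [hiff1 y hok]
            simp only [List.mem_cons]
            tauto
        · -- mark only
          have hvis : pvVisit g H W bg x st d =
              (((x.1 + d.1, x.2 + d.2) : Int × Int) :: st.1, st.2) := by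
            unfold pvVisit; rw [if_pos hc, if_neg hfg]
          rw [hvis]
          obtain ⟨mono1, h41, add1, heq1, hnd1, hprops1, hiff1⟩ :=
            ih (((x.1 + d.1, x.2 + d.2) : Int × Int) :: st.1, st.2) hds'
          have hnok : pvOkB g H W bg ((x.1 + d.1, x.2 + d.2) : Int × Int) = false := by
            simp only [pvOkB, Bool.and_eq_false_iff]
            right; exact Bool.eq_false_iff.mpr hfg
          refine ⟨fun y hy => mono1 y (List.mem_cons_of_mem _ hy), ?_, add1, heq1, hnd1, ?_, ?_⟩
          · intro e he hinb
            rcases List.mem_cons.mp he with rfl | he'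
            · exact mono1 _ (List.mem_cons_self ..)
            · exact h41 e he' hinb
          · intro y hy
            obtain ⟨h1, h2, h3, h4⟩ := hprops1 y hy
            exact ⟨h1, h2, fun hmem => h3 (List.mem_cons_of_mem _ hmem), h4⟩
          · intro y hok
            rw [hiff1 y hok]
            have hyne : y ≠ ((x.1 + d.1, x.2 + d.2) : Int × Int) := by
              rintro rfl; rw [hok] at hnok; exact Bool.true_eq_false.mp hnok
            simp only [List.mem_cons]
            tauto
      · -- no change
        have hvis : pvVisit g H W bg x st d = st := by
          unfold pvVisit; rw [if_neg hc]
        rw [hvis]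
        obtain ⟨mono1, h41, add1, heq1, hnd1, hprops1, hiff1⟩ := ih st hds'
        refine ⟨mono1, ?_, add1, heq1, hnd1, hprops1, hiff1⟩
        intro e he hinb
        rcases List.mem_cons.mp he with rfl | he'
        · have : ((x.1 + e.1, x.2 + e.2) : Int × Int) ∈ st.1 := by
            by_contra hnot
            exact hc ⟨hinb, hnot⟩
          exact mono1 _ this
        · exact h41 e he' hinb

-- A side: BFS computes the reachable set
lemma pvBfs_spec (g : List (List Int)) (H W : Int) (bg : Option Int) (s : Int × Int)
    (seen0 : List (Int × Int)) :
    ∀ q seen comp,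
    (∀ x ∈ q, pvOkB g H W bg x = true ∧ x ∈ seen ∧ pvReach g H W bg s x) →
    (∀ x ∈ comp, pvOkB g H W bg x = true ∧ x ∈ seen ∧ pvReach g H W bg s x) →
    (comp ++ q).Nodup →
    (∀ x, pvOkB g H W bg x = true → (x ∈ seen ↔ x ∈ seen0 ∨ x ∈ comp ∨ x ∈ q)) →
    (∀ x ∈ comp, ∀ y, pvStep g H W bg x y → y ∈ seen) →
    (s ∈ comp ∨ s ∈ q) →
    (∀ y, pvReach g H W bg s y → y ∉ seen0) →
    (∀ x, x ∈ (pvBfs g H W bg q seen comp).1 ↔ pvReach g H W bg s x) ∧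
    (pvBfs g H W bg q seen comp).1.Nodup ∧
    (∀ x, pvOkB g H W bg x = true →
      (x ∈ (pvBfs g H W bg q seen comp).2 ↔ x ∈ seen0 ∨ x ∈ (pvBfs g H W bg q seen comp).1)) := by
  intro q seen comp
  induction q, seen, comp using pvBfs.induct (g := g) (H := H) (W := W) (bg := bg) with
  | case1 seen comp =>
      intro _ hc hnd hseen hcl hs h0
      have hres : pvBfs g H W bg [] seen comp = (comp, seen) := by rw [pvBfs]
      rw [hres]
      have hmem : ∀ x, x ∈ comp ↔ pvReach g H W bg s x := by
        intro x
        constructor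
        · exact fun hx => (hc x hx).2.2
        · intro h
          induction h with
          | refl => simpa using hs
          | @tail b c h1 h2 ih3 =>
              have hcseen : c ∈ seen := hcl b ih3 c h2
              have hok : pvOkB g H W bg c = true := h2.2.1
              rcases (hseen c hok).mp hcseen with h' | h' | h'
              · exact absurd h' (h0 c (Relation.ReflTransGen.tail h1 h2))
              · exact h'
              · simp at h'
      refine ⟨hmem, by simpa using hnd, ?_⟩
      intro y hok
      have := hseen y hok
      simpa using this
  | case2 x q seen comp st ih =>
      intro hq hc hnd hseen hcl hs h0
      obtain ⟨mono, h4, add, heq2, hndadd, hprops, hiff⟩ :=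
        pvFoldVisit_spec g H W bg x pvDirs (seen, q) (fun _ h => h)
      have hxq := hq x (List.mem_cons_self ..)
      have hxok := hxq.1
      have hxseen : x ∈ seen := hxq.2.1
      have hxreach := hxq.2.2
      have haddreach : ∀ y ∈ add, pvReach g H W bg s y := fun y hy =>
        Relation.ReflTransGen.tail hxreach ⟨hxok, (hprops y hy).1, (hprops y hy).2.1⟩
      have hq' : ∀ y ∈ (List.foldl (pvVisit g H W bg x) (seen, q) pvDirs).2,
          pvOkB g H W bg y = true ∧ y ∈ (List.foldl (pvVisit g H W bg x) (seen, q) pvDirs).1 ∧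
          pvReach g H W bg s y := by
        intro y hy
        rw [heq2] at hy
        rcases List.mem_append.mp hy with hy' | hy'
        · have h := hq y (List.mem_cons_of_mem _ hy')
          exact ⟨h.1, mono y h.2.1, h.2.2⟩
        · obtain ⟨h1, _, _, h4'⟩ := hprops y hy'
          exact ⟨h1, h4', haddreach y hy'⟩
      have hc' : ∀ y ∈ comp ++ [x],
          pvOkB g H W bg y = true ∧ y ∈ (List.foldl (pvVisit g H W bg x) (seen, q) pvDirs).1 ∧
          pvReach g H W bg s y := by
        intro y hy
        rcases List.mem_append.mp hy with hy' | hy'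
        · have h := hc y hy'
          exact ⟨h.1, mono y h.2.1, h.2.2⟩
        · rcases List.mem_singleton.mp hy' with rfl
          exact ⟨hxok, mono _ hxseen, hxreach⟩
      have hseensub : ∀ y, y ∈ comp ++ x :: q → y ∈ seen := by
        intro y hy
        rcases List.mem_append.mp hy with hy' | hy'
        · exact (hc y hy').2.1
        · rcases List.mem_cons.mp hy' with rfl | hy''
          · exact hxseen
          · exact (hq y (List.mem_cons_of_mem _ hy'')).2.1
      have hnd' : ((comp ++ [x]) ++ (List.foldl (pvVisit g H W bg x) (seen, q) pvDirs).2).Nodup := by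
        rw [heq2]
        have hassoc : (comp ++ [x]) ++ (q ++ add) = (comp ++ x :: q) ++ add := by
          simp
        rw [hassoc]
        rw [List.nodup_append]
        refine ⟨hnd, hndadd, ?_⟩
        intro a ha b hb
        rintro rfl
        exact (hprops a hb).2.2.1 (hseensub a ha)
      have hseen' : ∀ y, pvOkB g H W bg y = true →
          (y ∈ (List.foldl (pvVisit g H W bg x) (seen, q) pvDirs).1 ↔
            y ∈ seen0 ∨ y ∈ comp ++ [x] ∨ y ∈ (List.foldl (pvVisit g H W bg x) (seen, q) pvDirs).2) := by
        intro y hok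
        rw [hiff y hok, heq2, hseen y hok]
        simp only [List.mem_append, List.mem_cons, List.mem_singleton]
        tauto
      have hcl' : ∀ z ∈ comp ++ [x], ∀ y, pvStep g H W bg z y →
          y ∈ (List.foldl (pvVisit g H W bg x) (seen, q) pvDirs).1 := by
        intro z hz y hstep
        rcases List.mem_append.mp hz with hz' | hz'
        · exact mono y (hcl z hz' y hstep)
        · rcases List.mem_singleton.mp hz' with rfl
          obtain ⟨d, hd, hdeq⟩ := List.mem_map.mp hstep.2.2
          have hinb : pvInb (z.1 + d.1) (z.2 + d.2) H W = true := by
            have hok := hstep.2.1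
            rw [← hdeq] at hok
            simp only [pvOkB, Bool.and_eq_true] at hok
            exact hok.1
          have := h4 d hd hinb
          rwa [hdeq] at this
      have hs' : s ∈ comp ++ [x] ∨ s ∈ (List.foldl (pvVisit g H W bg x) (seen, q) pvDirs).2 := by
        rcases hs with hs0 | hs0
        · exact Or.inl (List.mem_append_left _ hs0)
        · rcases List.mem_cons.mp hs0 with rfl | hs1
          · exact Or.inl (List.mem_append_right _ (List.mem_singleton.mpr rfl))
          · exact Or.inr (by rw [heq2]; exact List.mem_append_left _ hs1)
      have hrec := ih hq' hc' hnd' hseen' hcl' hs' h0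
      have hres : pvBfs g H W bg (x :: q) seen comp =
          pvBfs g H W bg (List.foldl (pvVisit g H W bg x) (seen, q) pvDirs).2
            (List.foldl (pvVisit g H W bg x) (seen, q) pvDirs).1 (comp ++ [x]) := by
        rw [pvBfs]
      rw [hres]
      exact hrec

-- B side: the label dictionary as a function on the foreground-cell list F
lemma pvLabKeys {F : List (Int × Int)} {d : PySem.Dict (Int × Int) Int} {f : (Int × Int) → Int}
    (h : d.items = F.map (fun p => (p, f p))) : d.keys = F := by
  simp [PySem.Dict.keys, h, List.map_map, Function.comp_def]

lemma pvLabGet {F : List (Int × Int)} {d : PySem.Dict (Int × Int) Int} {f : (Int × Int) → Int}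
    (hnd : F.Nodup) (h : d.items = F.map (fun p => (p, f p))) (q : Int × Int) :
    d.get? q = if q ∈ F then some (f q) else none := by
  by_cases hq : q ∈ F
  · rw [if_pos hq]
    exact PySem.Dict.get?_of_mem_items d (by rw [h]; exact List.mem_map.mpr ⟨q, hq, rfl⟩)
      (by rw [pvLabKeys h]; exact hnd)
  · rw [if_neg hq, PySem.Dict.get?_eq_none_iff_not_mem_keys, pvLabKeys h]
    exact hq

-- the pure form of one relaxation at p
def pvRelaxF (F : List (Int × Int)) (f : (Int × Int) → Int) (p : Int × Int) : Int :=
  (pvNbrs4 p).foldl (fun m q => if q ∈ F then (if f q < m then f q else m) else m) (f p)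

lemma pvRelax_eq {F : List (Int × Int)} {d : PySem.Dict (Int × Int) Int} {f : (Int × Int) → Int}
    (hnd : F.Nodup) (h : d.items = F.map (fun p => (p, f p))) (p : Int × Int) (v : Int) :
    pvRelax d p v =
      (pvNbrs4 p).foldl (fun m q => if q ∈ F then (if f q < m then f q else m) else m) v := by
  unfold pvRelax
  apply PySem.List.foldl_congr_mem
  intro m q _
  rw [pvLabGet hnd h q]
  by_cases hq : q ∈ F
  · simp [hq]
  · simp [hq]

lemma pvStepLab_items {F : List (Int × Int)} {d : PySem.Dict (Int × Int) Int} {f : (Int × Int) → Int}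
    (hnd : F.Nodup) (h : d.items = F.map (fun p => (p, f p))) :
    (pvStepLab d).items = F.map (fun p => (p, pvRelaxF F f p)) := by
  unfold pvStepLab
  rw [h, List.foldl_map]
  have hfresh : ∀ a ∈ F, (PySem.Dict.empty (κ := Int × Int) (ν := Int)).contains ((fun p => p) a) = false := by
    intro a _; exact PySem.Dict.contains_empty _
  have hthis := PySem.Dict.items_foldl_insert_fresh (l := F) (k := fun p => p)
    (v := fun p => pvRelax d p (f p)) (d := PySem.Dict.empty) hfresh (by simpa using hnd)
  rw [show (List.foldl (fun d' (p : Int × Int) => d'.insert p (pvRelax d p (f p)))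
        PySem.Dict.empty F) = (List.foldl (fun d' p => d'.insert ((fun p => p) p) ((fun p => pvRelax d p (f p)) p)) PySem.Dict.empty F) from rfl, hthis]
  simp only [List.nil_append]
  apply List.map_congr_left
  intro p hp
  rw [pvRelax_eq hnd h p (f p)]
  rfl

-- bounds of the min-fold
lemma pvFoldMin_le_init (F : List (Int × Int)) (f : (Int × Int) → Int) :
    ∀ (l : List (Int × Int)) (m : Int),
      l.foldl (fun m q => if q ∈ F then (if f q < m then f q else m) else m) m ≤ m := by
  intro l
  induction l with
  | nil => intro m; simp
  | cons a l ih =>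
      intro m
      simp only [List.foldl_cons]
      refine le_trans (ih _) ?_
      by_cases ha : a ∈ F
      · by_cases hlt : f a < m
        · simp [ha, hlt]; omega
        · simp [ha, hlt]
      · simp [ha]

lemma pvFoldMin_le_mem (F : List (Int × Int)) (f : (Int × Int) → Int) :
    ∀ (l : List (Int × Int)) (m : Int) (q : Int × Int), q ∈ l → q ∈ F →
      l.foldl (fun m q => if q ∈ F then (if f q < m then f q else m) else m) m ≤ f q := by
  intro l
  induction l with
  | nil => intro m q hq; simp at hq
  | cons a l ih =>
      intro m q hq hqF
      simp only [List.foldl_cons]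
      rcases List.mem_cons.mp hq with rfl | hq'
      · refine le_trans (pvFoldMin_le_init F f l _) ?_
        by_cases hlt : f q < m
        · simp [hqF, hlt]
        · simp [hqF, hlt]; omega
      · exact ih _ q hq' hqF

lemma pvFoldMin_attained (F : List (Int × Int)) (f : (Int × Int) → Int) :
    ∀ (l : List (Int × Int)) (m : Int),
      l.foldl (fun m q => if q ∈ F then (if f q < m then f q else m) else m) m = m ∨
      ∃ q ∈ l, q ∈ F ∧
        l.foldl (fun m q => if q ∈ F then (if f q < m then f q else m) else m) m = f q := by
  intro l
  induction l with
  | nil => intro m; left; rfl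
  | cons a l ih =>
      intro m
      simp only [List.foldl_cons]
      by_cases ha : a ∈ F
      · by_cases hlt : f a < m
        · rw [if_pos ha, if_pos hlt]
          rcases ih (f a) with h | ⟨q, hq, hqF, h⟩
          · exact Or.inr ⟨a, List.mem_cons_self .., ha, h⟩
          · exact Or.inr ⟨q, List.mem_cons_of_mem _ hq, hqF, h⟩
        · rw [if_pos ha, if_neg hlt]
          rcases ih m with h | ⟨q, hq, hqF, h⟩
          · exact Or.inl h
          · exact Or.inr ⟨q, List.mem_cons_of_mem _ hq, hqF, h⟩
      · rw [if_neg ha]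
        rcases ih m with h | ⟨q, hq, hqF, h⟩
        · exact Or.inl h
        · exact Or.inr ⟨q, List.mem_cons_of_mem _ hq, hqF, h⟩

-- the labelling invariant: every label is the flattened index of a reachable cell
def pvLabInv (g : List (List Int)) (H W : Int) (bg : Option Int) (F : List (Int × Int))
    (f : (Int × Int) → Int) : Prop :=
  ∀ p ∈ F, ∃ w ∈ F, pvReach g H W bg p w ∧ f p = w.1 * W + w.2

lemma pvLabInv_relax {g : List (List Int)} {H W : Int} {bg : Option Int} {F : List (Int × Int)}
    {f : (Int × Int) → Int} (hF : ∀ p, p ∈ F ↔ pvOkB g H W bg p = true)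
    (hinv : pvLabInv g H W bg F f) : pvLabInv g H W bg F (pvRelaxF F f) := by
  intro p hp
  rcases pvFoldMin_attained F f (pvNbrs4 p) (f p) with h | ⟨q, hqn, hqF, h⟩
  · obtain ⟨w, hwF, hwr, hwv⟩ := hinv p hp
    exact ⟨w, hwF, hwr, by rw [pvRelaxF, h, hwv]⟩
  · obtain ⟨w, hwF, hwr, hwv⟩ := hinv q hqF
    refine ⟨w, hwF, Relation.ReflTransGen.head ?_ hwr, by rw [pvRelaxF, h, hwv]⟩
    exact ⟨(hF p).mp hp, (hF q).mp hqF, by rw [pvNbrs_eq]; exact hqn⟩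

lemma pvLabInv_nonneg {g : List (List Int)} {H W : Int} {bg : Option Int} {F : List (Int × Int)}
    {f : (Int × Int) → Int} (hF : ∀ p, p ∈ F ↔ pvOkB g H W bg p = true)
    (hinv : pvLabInv g H W bg F f) : ∀ p ∈ F, 0 ≤ f p := by
  intro p hp
  obtain ⟨w, hwF, _, hwv⟩ := hinv p hp
  have hok := (hF w).mp hwF
  simp only [pvOkB, Bool.and_eq_true, pvInb, decide_eq_true_eq] at hok
  obtain ⟨⟨h1, _, h3, h4⟩, _⟩ := hok
  rw [hwv]
  have : 0 ≤ w.1 * W := mul_nonneg h1 (by omega)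
  omega

lemma pvSum_toNat_lt (f g' : (Int × Int) → Int) :
    ∀ (F : List (Int × Int)), (∀ p ∈ F, g' p ≤ f p) → (∀ p ∈ F, 0 ≤ g' p) →
    (∃ p ∈ F, g' p ≠ f p) →
    (F.map (fun p => (g' p).toNat)).sum < (F.map (fun p => (f p).toNat)).sum := by
  intro F
  induction F with
  | nil => rintro _ _ ⟨p, hp, _⟩; simp at hp
  | cons a F ih =>
      intro hle hnn hex
      have hsumle : (F.map (fun p => (g' p).toNat)).sum ≤ (F.map (fun p => (f p).toNat)).sum := by
        apply List.sum_le_sum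
        intro p hp
        have h1 := hle p (List.mem_cons_of_mem _ hp)
        have h2 := hnn p (List.mem_cons_of_mem _ hp)
        omega
      have hale : (g' a).toNat ≤ (f a).toNat := by
        have h1 := hle a (List.mem_cons_self ..)
        have h2 := hnn a (List.mem_cons_self ..)
        omega
      obtain ⟨p, hp, hpne⟩ := hex
      rcases List.mem_cons.mp hp with rfl | hp'
      · have h1 := hle p (List.mem_cons_self ..)
        have h2 := hnn p (List.mem_cons_self ..)
        have : (g' p).toNat < (f p).toNat := by omega
        simp only [List.map_cons, List.sum_cons]
        omega
      · have : (F.map (fun p => (g' p).toNat)).sum < (F.map (fun p => (f p).toNat)).sum :=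
          ih (fun q hq => hle q (List.mem_cons_of_mem _ hq))
             (fun q hq => hnn q (List.mem_cons_of_mem _ hq)) ⟨p, hp', hpne⟩
        simp only [List.map_cons, List.sum_cons]
        omega

-- the fuelled while-loop reaches a genuine fixpoint
lemma pvIterFix {g : List (List Int)} {H W : Int} {bg : Option Int} {F : List (Int × Int)}
    (hF : ∀ p, p ∈ F ↔ pvOkB g H W bg p = true) (hnd : F.Nodup) :
    ∀ (fuel : Nat) (d : PySem.Dict (Int × Int) Int) (f : (Int × Int) → Int),
      d.items = F.map (fun p => (p, f p)) → pvLabInv g H W bg F f →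
      (F.map (fun p => (f p).toNat)).sum < fuel →
      ∃ ℓ, (pvIterLab fuel d).items = F.map (fun p => (p, ℓ p)) ∧ pvLabInv g H W bg F ℓ ∧
        ∀ p ∈ F, pvRelaxF F ℓ p = ℓ p := by
  intro fuel
  induction fuel with
  | zero => intro d f _ _ hfuel; omega
  | succ n ih =>
      intro d f h hinv hfuel
      by_cases hfix : pvStepLab d = d
      · refine ⟨f, ?_, hinv, ?_⟩
        · show (pvIterLab (n + 1) d).items = _
          rw [pvIterLab]
          simp only [hfix, if_pos rfl]
          exact h
        · intro p hp
          have h2 : F.map (fun p => (p, pvRelaxF F f p)) = F.map (fun p => (p, f p)) := by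
            rw [← pvStepLab_items hnd h, hfix, h]
          have := List.map_inj_left.mp h2 p hp
          exact congrArg Prod.snd this
      · have hres : pvIterLab (n + 1) d = pvIterLab n (pvStepLab d) := by
          show (if pvStepLab d = d then d else pvIterLab n (pvStepLab d)) = _
          rw [if_neg hfix]
        rw [hres]
        have hstep := pvStepLab_items hnd h
        have hinv' := pvLabInv_relax hF hinv
        have hex : ∃ p ∈ F, pvRelaxF F f p ≠ f p := by
          by_contra hno
          push_neg at hno
          apply hfix
          apply PySem.Dict.ext
          rw [hstep, h]
          apply List.map_congr_left
          intro p hp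
          rw [hno p hp]
        have hdec : (F.map (fun p => (pvRelaxF F f p).toNat)).sum <
            (F.map (fun p => (f p).toNat)).sum := by
          exact pvSum_toNat_lt f (pvRelaxF F f) F
            (fun p _ => pvFoldMin_le_init F f (pvNbrs4 p) (f p))
            (pvLabInv_nonneg hF hinv') hex
        exact ih (pvStepLab d) (pvRelaxF F f) hstep hinv' (by omega)

lemma nodup_pvAll (H W : Int) : (pvAll H W).Nodup := by
  unfold pvAll
  rw [List.nodup_flatMap]
  constructor
  · intro r _
    exact (PySem.List.nodup_pyRange_one 0 W).map (fun a b h => by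
      simpa using congrArg Prod.snd h)
  · refine (PySem.List.pairwise_lt_pyRange_one 0 H).imp ?_
    intro a b hab
    simp only [Function.onFun]
    intro x hxa hxb
    simp only [List.mem_map] at hxa hxb
    obtain ⟨c1, _, rfl⟩ := hxa
    obtain ⟨c2, _, he⟩ := hxb
    have hba : b = a := by simpa using congrArg Prod.fst he
    exact absurd hba.symm (ne_of_lt hab)

lemma pvIdx_inj {W : Int} (hW : 0 < W) {w w' : Int × Int}
    (h2 : 0 ≤ w.2) (h2' : w.2 < W) (h3 : 0 ≤ w'.2) (h3' : w'.2 < W)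
    (h : w.1 * W + w.2 = w'.1 * W + w'.2) : w = w' := by
  have h1 : w.1 = w'.1 := by
    rcases lt_trichotomy w.1 w'.1 with hlt | heq | hgt
    · exfalso
      have := mul_le_mul_of_nonneg_right (show w.1 + 1 ≤ w'.1 by omega) (le_of_lt hW)
      nlinarith
    · exact heq
    · exfalso
      have := mul_le_mul_of_nonneg_right (show w'.1 + 1 ≤ w.1 by omega) (le_of_lt hW)
      nlinarith
  have : w.2 = w'.2 := by
    rw [h1] at h; omega
  exact Prod.ext h1 this

-- at the fixpoint, labels are constant exactly on connected components
lemma pvClass {g : List (List Int)} {H W : Int} {bg : Option Int} {F : List (Int × Int)}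
    (hF : ∀ p, p ∈ F ↔ pvOkB g H W bg p = true) (hW : 0 < W) {ℓ : (Int × Int) → Int}
    (hinv : pvLabInv g H W bg F ℓ) (hfix : ∀ p ∈ F, pvRelaxF F ℓ p = ℓ p) :
    ∀ p q, p ∈ F → q ∈ F → (ℓ p = ℓ q ↔ pvReach g H W bg p q) := by
  have edge : ∀ p q, pvStep g H W bg p q → ℓ p ≤ ℓ q := by
    intro p q hst
    have hpF : p ∈ F := (hF p).mpr hst.1
    have hqF : q ∈ F := (hF q).mpr hst.2.1
    have hqn : q ∈ pvNbrs4 p := by rw [← pvNbrs_eq]; exact hst.2.2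
    have hle := pvFoldMin_le_mem F ℓ (pvNbrs4 p) (ℓ p) q hqn hqF
    have : pvRelaxF F ℓ p ≤ ℓ q := hle
    rwa [hfix p hpF] at this
  intro p q hp hq
  constructor
  · intro heq
    obtain ⟨w, hwF, hwr, hwv⟩ := hinv p hp
    obtain ⟨w', hw'F, hw'r, hw'v⟩ := hinv q hq
    have hww : w = w' := by
      have hokw := (hF w).mp hwF
      have hokw' := (hF w').mp hw'F
      simp only [pvOkB, Bool.and_eq_true, pvInb, decide_eq_true_eq] at hokw hokw'
      exact pvIdx_inj hW hokw.1.2.2.1 hokw.1.2.2.2 hokw'.1.2.2.1 hokw'.1.2.2.2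
        (by rw [← hwv, ← hw'v, heq])
    subst hww
    exact hwr.trans (pvReach_symm hw'r)
  · intro hr
    clear hp
    induction hr with
    | refl => rfl
    | tail h1 h2 ih =>
        exact (ih ((hF _).mpr h2.1)).trans (le_antisymm (edge _ _ h2) (edge _ _ (pvStep_symm h2)))

lemma forall₂_mem_left {α β : Type} {R : α → β → Prop} {l1 : List α} {l2 : List β}
    (h : List.Forall₂ R l1 l2) {a : α} (ha : a ∈ l1) : ∃ b ∈ l2, R a b := by
  induction h with
  | nil => simp at ha
  | cons hr _ ih =>
      rcases List.mem_cons.mp ha with rfl | ha'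
      · exact ⟨_, List.mem_cons_self .., hr⟩
      · obtain ⟨b, hb, hRb⟩ := ih ha'
        exact ⟨b, List.mem_cons_of_mem _ hb, hRb⟩

lemma forall₂_mem_right {α β : Type} {R : α → β → Prop} {l1 : List α} {l2 : List β}
    (h : List.Forall₂ R l1 l2) {b : β} (hb : b ∈ l2) : ∃ a ∈ l1, R a b := by
  induction h with
  | nil => simp at hb
  | cons hr _ ih =>
      rcases List.mem_cons.mp hb with rfl | hb'
      · exact ⟨_, List.mem_cons_self .., hr⟩
      · obtain ⟨a, ha, hRa⟩ := ih hb'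
        exact ⟨a, List.mem_cons_of_mem _ ha, hRa⟩

lemma forall₂_append_singleton' {α β : Type} {R : α → β → Prop} {l1 : List α} {l2 : List β} {a : α} {b : β}
    (h : List.Forall₂ R l1 l2) (hab : R a b) : List.Forall₂ R (l1 ++ [a]) (l2 ++ [b]) := by
  induction h with
  | nil => exact List.forall₂_cons.mpr ⟨hab, List.Forall₂.nil⟩
  | cons hx hrest ih => exact List.forall₂_cons.mpr ⟨hx, ih⟩

-- A's scan, related to the ℓ-classes: the emitted components are exactly the ℓ-classes
-- of the keys recorded in first-seen order
lemma pvScanA (g : List (List Int)) (H W : Int) (bg : Option Int) (F : List (Int × Int))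
    (ℓ : (Int × Int) → Int)
    (hF : ∀ p, p ∈ F ↔ pvOkB g H W bg p = true)
    (hFnd : F.Nodup)
    (hcls : ∀ p q, p ∈ F → q ∈ F → (ℓ p = ℓ q ↔ pvReach g H W bg p q)) :
    ∀ (l : List (Int × Int)) (seen : List (Int × Int)) (comps : List (List (Int × Int)))
      (keys : List Int),
    (∀ x ∈ l, pvInb x.1 x.2 H W = true) →
    (∀ x, pvOkB g H W bg x = true → (x ∈ seen ↔ ∃ c ∈ comps, x ∈ c)) →
    (∀ c ∈ comps, ∃ s, pvOkB g H W bg s = true ∧ c.Nodup ∧ (∀ x, x ∈ c ↔ pvReach g H W bg s x)) →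
    List.Forall₂ (fun c k => CompEq c (F.filter (fun p => ℓ p == k))) comps keys →
    List.Forall₂ (fun c k => CompEq c (F.filter (fun p => ℓ p == k)))
      (l.foldl (pvScanCellA g H W bg) (seen, comps)).2
      (PySem.Set.update keys ((l.filter (fun p => pvIsFg bg (pvVal g p.1 p.2))).map ℓ)) := by
  intro l
  induction l with
  | nil =>
      intro seen comps keys _ _ _ h4
      simpa [PySem.Set.update] using h4
  | cons p l ih =>
      intro seen comps keys hl hinv1 hinv2 h4
      have hinb : pvInb p.1 p.2 H W = true := hl p (List.mem_cons_self ..)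
      have hl' : ∀ x ∈ l, pvInb x.1 x.2 H W = true := fun x hx => hl x (List.mem_cons_of_mem _ hx)
      simp only [List.foldl_cons]
      by_cases hfg : pvIsFg bg (pvVal g p.1 p.2) = true
      · have hok : pvOkB g H W bg p = true := by
          simp only [pvOkB, Bool.and_eq_true]; exact ⟨hinb, hfg⟩
        have hpF : p ∈ F := (hF p).mpr hok
        have hfilter : (p :: l).filter (fun p => pvIsFg bg (pvVal g p.1 p.2)) =
            p :: l.filter (fun p => pvIsFg bg (pvVal g p.1 p.2)) := by
          rw [List.filter_cons, if_pos hfg]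
        rw [hfilter, List.map_cons, PySem.Set.update_cons]
        by_cases hp : p ∈ seen
        · -- already emitted: state unchanged, key already recorded
          have hA : pvScanCellA g H W bg (seen, comps) p = (seen, comps) := by
            unfold pvScanCellA; rw [if_pos hp]
          rw [hA]
          obtain ⟨c, hc, hpc⟩ := (hinv1 p hok).mp hp
          obtain ⟨k, hk, hck⟩ := forall₂_mem_left h4 hc
          have hℓp : ℓ p = k := by
            have := (hck.2.2 p).mp hpc
            have := List.mem_filter.mp this
            exact beq_iff_eq.mp this.2
          rw [PySem.Set.add_of_mem (by rw [hℓp]; exact hk)]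
          exact ih seen comps keys hl' hinv1 hinv2 h4
        · -- fresh seed: A emits the whole class, the key is appended
          have hnfg : ¬ pvIsFg bg (pvVal g p.1 p.2) = false := by rw [hfg]; simp
          have hA : pvScanCellA g H W bg (seen, comps) p =
              ((pvBfs g H W bg [p] (p :: seen) []).2,
               comps ++ [(pvBfs g H W bg [p] (p :: seen) []).1]) := by
            unfold pvScanCellA; rw [if_neg hp, if_neg hnfg]
          rw [hA]
          have h0 : ∀ y, pvReach g H W bg p y → y ∉ seen := by
            intro y hreach hy
            have hyok : pvOkB g H W bg y = true := pvReach_ok hok hreach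
            obtain ⟨c, hc, hyc⟩ := (hinv1 y hyok).mp hy
            obtain ⟨s, hsok, _, hsmem⟩ := hinv2 c hc
            have hsy : pvReach g H W bg s y := (hsmem y).mp hyc
            have hsp : pvReach g H W bg s p := hsy.trans (pvReach_symm hreach)
            exact hp ((hinv1 p hok).mpr ⟨c, hc, (hsmem p).mpr hsp⟩)
          obtain ⟨hAmem, hAnd, hAseen⟩ := pvBfs_spec g H W bg p seen [p] (p :: seen) []
            (by
              intro y hy
              rcases List.mem_singleton.mp hy with rfl
              exact ⟨hok, List.mem_cons_self .., Relation.ReflTransGen.refl⟩)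
            (by simp)
            (by simp)
            (by
              intro y _
              constructor
              · intro h
                rcases List.mem_cons.mp h with rfl | h'
                · exact Or.inr (Or.inr (List.mem_singleton.mpr rfl))
                · exact Or.inl h'
              · rintro (h | h | h)
                · exact List.mem_cons_of_mem _ h
                · exact absurd h (List.not_mem_nil)
                · rw [List.mem_singleton] at h
                  subst h
                  exact List.mem_cons_self ..)
            (by simp)
            (by simp)
            h0
          have hckey : CompEq (pvBfs g H W bg [p] (p :: seen) []).1
              (F.filter (fun q => ℓ q == ℓ p)) := by
            refine ⟨hAnd, hFnd.filter _, ?_⟩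
            intro x
            rw [hAmem x, List.mem_filter]
            constructor
            · intro hr
              have hxF : x ∈ F := (hF x).mpr (pvReach_ok hok hr)
              exact ⟨hxF, beq_iff_eq.mpr ((hcls p x hpF hxF).mpr hr).symm⟩
            · rintro ⟨hxF, hbe⟩
              exact pvReach_symm ((hcls x p hxF hpF).mp (beq_iff_eq.mp hbe))
          have hknew : ℓ p ∉ keys := by
            intro hmem
            obtain ⟨c, hc, hck⟩ := forall₂_mem_right h4 hmem
            have hpc : p ∈ c := (hck.2.2 p).mpr
              (List.mem_filter.mpr ⟨hpF, beq_iff_eq.mpr rfl⟩)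
            exact hp ((hinv1 p hok).mpr ⟨c, hc, hpc⟩)
          rw [PySem.Set.add_of_not_mem hknew]
          apply ih
          · exact hl'
          · intro x hxok
            rw [hAseen x hxok]
            constructor
            · rintro (hx | hx)
              · obtain ⟨c, hc, hxc⟩ := (hinv1 x hxok).mp hx
                exact ⟨c, List.mem_append_left _ hc, hxc⟩
              · exact ⟨_, List.mem_append_right _ (List.mem_singleton.mpr rfl), hx⟩
            · rintro ⟨c, hc, hxc⟩
              rcases List.mem_append.mp hc with hc' | hc'
              · exact Or.inl ((hinv1 x hxok).mpr ⟨c, hc', hxc⟩)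
              · rw [List.mem_singleton] at hc'
                subst hc'
                exact Or.inr hxc
          · intro c hc
            rcases List.mem_append.mp hc with hc' | hc'
            · exact hinv2 c hc'
            · rw [List.mem_singleton] at hc'
              subst hc'
              exact ⟨p, hok, hAnd, hAmem⟩
          · exact forall₂_append_singleton' h4 hckey
      · -- background cell (or already-seen background cell)
        have hfilter : (p :: l).filter (fun p => pvIsFg bg (pvVal g p.1 p.2)) =
            l.filter (fun p => pvIsFg bg (pvVal g p.1 p.2)) := by
          rw [List.filter_cons, if_neg hfg]
        rw [hfilter]
        by_cases hp : p ∈ seen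
        · have hA : pvScanCellA g H W bg (seen, comps) p = (seen, comps) := by
            unfold pvScanCellA; rw [if_pos hp]
          rw [hA]
          exact ih seen comps keys hl' hinv1 hinv2 h4
        · have hA : pvScanCellA g H W bg (seen, comps) p = (p :: seen, comps) := by
            unfold pvScanCellA
            rw [if_neg hp, if_pos (Bool.eq_false_iff.mpr hfg)]
          rw [hA]
          apply ih _ _ _ hl' _ hinv2 h4
          intro x hxok
          rw [← hinv1 x hxok]
          constructor
          · intro hx
            rcases List.mem_cons.mp hx with rfl | hx'
            · exfalso
              simp only [pvOkB, Bool.and_eq_true] at hxok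
              exact hfg hxok.2
            · exact hx'
          · exact fun hx => List.mem_cons_of_mem _ hx

-- selection and crop depend only on the component sets
lemma compEq_length {c1 c2 : List (Int × Int)} (h : CompEq c1 c2) : c1.length = c2.length :=
  ((List.perm_ext_iff_of_nodup h.1 h.2.1).mpr h.2.2).length_eq

lemma foldl_rel {α β : Type} {R : α → α → Prop} {S : β → β → Prop}
    (f : β → α → β) (hf : ∀ a b m1 m2, R a b → S m1 m2 → S (f m1 a) (f m2 b)) :
    ∀ {as bs : List α}, List.Forall₂ R as bs → ∀ {o1 o2 : β}, S o1 o2 →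
    S (as.foldl f o1) (bs.foldl f o2) := by
  intro as bs h
  induction h with
  | nil => intro o1 o2 ho; exact ho
  | cons hab hrest ih =>
      intro o1 o2 ho
      simp only [List.foldl_cons]
      exact ih (hf _ _ _ _ hab ho)

lemma pvMax?_len_rel {as bs : List (List (Int × Int))} (h : List.Forall₂ CompEq as bs) :
    Option.Rel CompEq (PySem.List.max? as (fun c => c.length)) (PySem.List.max? bs (fun c => c.length)) := by
  unfold PySem.List.max?
  refine foldl_rel _ ?_ h Option.Rel.none
  intro a b m1 m2 hab hm
  cases hm with
  | none => exact Option.Rel.some hab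
  | some hm12 =>
      rename_i m1' m2'
      simp only [show (match some m1' with
          | none => some a
          | some m => if (fun c => c.length) m < (fun c => c.length) a then some a else some m) =
          if m1'.length < a.length then some a else some m1' from rfl,
        show (match some m2' with
          | none => some b
          | some m => if (fun c => c.length) m < (fun c => c.length) b then some b else some m) =
          if m2'.length < b.length then some b else some m2' from rfl]
      by_cases hlt : m2'.length < b.length
      · rw [if_pos (show m1'.length < a.length by
            rw [compEq_length hm12, compEq_length hab]; exact hlt), if_pos hlt]
        exact Option.Rel.some hab
      · rw [if_neg (show ¬ m1'.length < a.length by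
            rw [compEq_length hm12, compEq_length hab]; exact hlt), if_neg hlt]
        exact Option.Rel.some hm12

lemma pvMin?_id_congr {a b : List Int} (h : ∀ x, x ∈ a ↔ x ∈ b) :
    PySem.List.min? a (fun x => x) = PySem.List.min? b (fun x => x) := by
  cases e1 : PySem.List.min? a (fun x => x) with
  | none =>
      rw [PySem.List.min?_eq_none_iff] at e1
      subst e1
      have hb : b = [] := List.eq_nil_iff_forall_not_mem.mpr
        (fun x hx => absurd ((h x).mpr hx) List.not_mem_nil)
      subst hb
      exact ((PySem.List.min?_eq_none_iff _ _).mpr rfl).symm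
  | some m =>
      have hma : m ∈ a := PySem.List.min?_mem e1
      have hmb : m ∈ b := (h m).mp hma
      cases e2 : PySem.List.min? b (fun x => x) with
      | none =>
          rw [PySem.List.min?_eq_none_iff] at e2
          subst e2
          exact absurd hmb (List.not_mem_nil)
      | some m' =>
          have hm'b : m' ∈ b := PySem.List.min?_mem e2
          have h1 := PySem.List.min?_isMin e1 m' ((h m').mpr hm'b)
          have h2 := PySem.List.min?_isMin e2 m hmb
          simp only [Option.some.injEq]
          exact le_antisymm h1 h2

lemma pvMax?_id_congr {a b : List Int} (h : ∀ x, x ∈ a ↔ x ∈ b) :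
    PySem.List.max? a (fun x => x) = PySem.List.max? b (fun x => x) := by
  cases e1 : PySem.List.max? a (fun x => x) with
  | none =>
      rw [PySem.List.max?_eq_none_iff] at e1
      subst e1
      have hb : b = [] := List.eq_nil_iff_forall_not_mem.mpr
        (fun x hx => absurd ((h x).mpr hx) List.not_mem_nil)
      subst hb
      exact ((PySem.List.max?_eq_none_iff _ _).mpr rfl).symm
  | some m =>
      have hma : m ∈ a := PySem.List.max?_mem e1
      have hmb : m ∈ b := (h m).mp hma
      cases e2 : PySem.List.max? b (fun x => x) with
      | none =>
          rw [PySem.List.max?_eq_none_iff] at e2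
          subst e2
          exact absurd hmb (List.not_mem_nil)
      | some m' =>
          have hm'b : m' ∈ b := PySem.List.max?_mem e2
          have h1 := PySem.List.max?_isMax e1 m' ((h m').mpr hm'b)
          have h2 := PySem.List.max?_isMax e2 m hmb
          simp only [Option.some.injEq]
          exact le_antisymm h2 h1

lemma pvCrop_congr (g : List (List Int)) {l1 l2 : List (Int × Int)} (h : CompEq l1 l2) :
    pvCrop g l1 = pvCrop g l2 := by
  obtain ⟨_, _, hmem⟩ := h
  by_cases h1 : l1 = []
  · subst h1
    have h2 : l2 = [] := List.eq_nil_iff_forall_not_mem.mpr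
      (fun x hx => absurd ((hmem x).mpr hx) List.not_mem_nil)
    subst h2; rfl
  · have h2 : l2 ≠ [] := by
      intro hc; subst hc
      exact h1 (List.eq_nil_iff_forall_not_mem.mpr
        (fun x hx => absurd ((hmem x).mp hx) List.not_mem_nil))
    have hfst : ∀ x, x ∈ l1.map (·.1) ↔ x ∈ l2.map (·.1) := by
      intro x
      simp only [List.mem_map]
      exact ⟨fun ⟨a, ha, e⟩ => ⟨a, (hmem a).mp ha, e⟩, fun ⟨a, ha, e⟩ => ⟨a, (hmem a).mpr ha, e⟩⟩
    have hsnd : ∀ x, x ∈ l1.map (·.2) ↔ x ∈ l2.map (·.2) := by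
      intro x
      simp only [List.mem_map]
      exact ⟨fun ⟨a, ha, e⟩ => ⟨a, (hmem a).mp ha, e⟩, fun ⟨a, ha, e⟩ => ⟨a, (hmem a).mpr ha, e⟩⟩
    simp only [pvCrop, if_neg h1, if_neg h2]
    rw [pvMin?_id_congr hfst, pvMax?_id_congr hfst, pvMin?_id_congr hsnd, pvMax?_id_congr hsnd]

lemma pvFinish_congr (g : List (List Int)) (dest : String) (H W bgc : Int)
    {cA cB : List (List (Int × Int))} (hrel : List.Forall₂ CompEq cA cB) :
    (if cA = [] then g else
      let largest := (PySem.List.max? cA (fun c => c.length)).getD []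
      let obj := pvCrop g largest
      let oh : Int := obj.length
      let ow : Int := (obj.headI).length
      let out : List (List Int) :=
        (PySem.List.pyRange 0 H 1).map (fun _ => (PySem.List.pyRange 0 W 1).map (fun _ => bgc))
      if dest = "topleft" then pvPaste out obj 0 0
      else
        let top := max 0 (PySem.Int.floordiv (H - oh) 2)
        let left := max 0 (PySem.Int.floordiv (W - ow) 2)
        pvPaste out obj top left) =
    (if cB = [] then g else
      let largest := (PySem.List.max? cB (fun c => c.length)).getD []
      let obj := pvCrop g largest
      let oh : Int := obj.length
      let ow : Int := (obj.headI).length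
      let out : List (List Int) :=
        (PySem.List.pyRange 0 H 1).map (fun _ => (PySem.List.pyRange 0 W 1).map (fun _ => bgc))
      if dest = "topleft" then pvPaste out obj 0 0
      else
        let top := max 0 (PySem.Int.floordiv (H - oh) 2)
        let left := max 0 (PySem.Int.floordiv (W - ow) 2)
        pvPaste out obj top left) := by
  by_cases hA : cA = []
  · have hB : cB = [] := by subst hA; cases hrel; rfl
    rw [if_pos hA, if_pos hB]
  · have hB : cB ≠ [] := by intro hc; subst hc; cases hrel; exact hA rfl
    rw [if_neg hA, if_neg hB]
    have hlarge : CompEq ((PySem.List.max? cA (fun c => c.length)).getD [])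
        ((PySem.List.max? cB (fun c => c.length)).getD []) := by
      have hr := pvMax?_len_rel hrel
      cases h1 : PySem.List.max? cA (fun c => c.length) with
      | none =>
          cases h2 : PySem.List.max? cB (fun c => c.length) with
          | none => exact ⟨List.nodup_nil, List.nodup_nil, fun _ => Iff.rfl⟩
          | some b' => rw [h1, h2] at hr; cases hr
      | some a' =>
          cases h2 : PySem.List.max? cB (fun c => c.length) with
          | none => rw [h1, h2] at hr; cases hr
          | some b' =>
              rw [h1, h2] at hr
              cases hr with
              | some h => simpa using h
    have hobj : pvCrop g ((PySem.List.max? cA (fun c => c.length)).getD []) =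
        pvCrop g ((PySem.List.max? cB (fun c => c.length)).getD []) := pvCrop_congr g hlarge
    simp only [hobj]

lemma int_bne_eq_decide (a b : Int) : (a != b) = decide (a ≠ b) := by
  by_cases h : a = b
  · subst h; simp
  · simp [h]

lemma pvComps_eq (g : List (List Int)) (bg : Option Int)
    (hg : ¬(g.length = 0 ∨ (g.headI).length = 0)) :
    pvComps g bg =
      ((pvAll (g.length : Int) ((g.headI).length : Int)).foldl
        (pvScanCellA g (g.length : Int) ((g.headI).length : Int) bg) ([], [])).2 := by
  unfold pvComps; rw [if_neg hg]

lemma pvCompsB_eq (g : List (List Int)) (bg : Option Int)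
    (hg : ¬(g.length = 0 ∨ (g.headI).length = 0)) :
    pvCompsB g bg =
      ((pvIterLab
          ((((pvAll (g.length : Int) ((g.headI).length : Int)).foldl
              (fun d p => if pvVal g p.1 p.2 ≠ (match bg with | some b => b | none => 0) then
                d.insert p (p.1 * ((g.headI).length : Int) + p.2) else d)
              PySem.Dict.empty).values.map Int.toNat).sum + 1)
          ((pvAll (g.length : Int) ((g.headI).length : Int)).foldl
              (fun d p => if pvVal g p.1 p.2 ≠ (match bg with | some b => b | none => 0) then
                d.insert p (p.1 * ((g.headI).length : Int) + p.2) else d)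
              PySem.Dict.empty)).items.foldl
        (fun d x => d.modify x.2 [] (· ++ [x.1])) PySem.Dict.empty).values := by
  unfold pvCompsB; rw [if_neg hg]

lemma pvComps_rel (g : List (List Int)) (bg : Option Int) :
    List.Forall₂ CompEq (pvComps g bg) (pvCompsB g bg) := by
  by_cases hg : g.length = 0 ∨ (g.headI).length = 0
  · unfold pvComps pvCompsB
    rw [if_pos hg, if_pos hg]
    exact List.Forall₂.nil
  · rw [pvComps_eq g bg hg, pvCompsB_eq g bg hg]
    have hW : 0 < ((g.headI).length : Int) := by
      rcases Nat.eq_zero_or_pos (g.headI).length with h | h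
      · exact absurd (Or.inr h) hg
      · exact_mod_cast h
    set H : Int := (g.length : Int) with hHdef
    set W : Int := ((g.headI).length : Int) with hWdef
    set bgv : Int := (match bg with | some b => b | none => 0) with hbgvdef
    set F : List (Int × Int) :=
      (pvAll H W).filter (fun p => decide (pvVal g p.1 p.2 ≠ bgv)) with hFdef
    have hfgv : ∀ v, pvIsFg bg v = decide (v ≠ bgv) := by
      intro v
      rw [hbgvdef]
      cases bg with
      | none => exact int_bne_eq_decide v 0
      | some b => exact int_bne_eq_decide v b
    have hF : ∀ p, p ∈ F ↔ pvOkB g H W bg p = true := by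
      intro p
      rw [hFdef, List.mem_filter]
      simp only [pvOkB, Bool.and_eq_true, hfgv]
      constructor
      · rintro ⟨h1, h2⟩
        refine ⟨?_, h2⟩
        simp only [pvInb, decide_eq_true_eq]
        exact mem_pvAll.mp h1
      · rintro ⟨h1, h2⟩
        refine ⟨?_, h2⟩
        simp only [pvInb, decide_eq_true_eq] at h1
        exact mem_pvAll.mpr h1
    have hFnd : F.Nodup := (nodup_pvAll H W).filter _
    -- the initial labels
    have h0items : ((pvAll H W).foldl
        (fun d p => if pvVal g p.1 p.2 ≠ bgv then d.insert p (p.1 * W + p.2) else d)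
        PySem.Dict.empty).items = F.map (fun p => (p, p.1 * W + p.2)) := by
      rw [PySem.List.foldl_ite_eq_foldl_filter
        (p := fun q : Int × Int => pvVal g q.1 q.2 ≠ bgv)
        (f := fun (d : PySem.Dict (Int × Int) Int) (p : Int × Int) => d.insert p (p.1 * W + p.2))
        (l := pvAll H W) (init := PySem.Dict.empty)]
      have hfresh : ∀ a ∈ F, (PySem.Dict.empty (κ := Int × Int) (ν := Int)).contains a = false :=
        fun a _ => PySem.Dict.contains_empty _
      have hthis := PySem.Dict.items_foldl_insert_fresh (l := F) (k := fun p => p)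
        (v := fun p : Int × Int => p.1 * W + p.2) (d := PySem.Dict.empty) hfresh (by simpa using hFnd)
      rw [← hFdef]
      rw [show (List.foldl (fun d (p : Int × Int) => d.insert p (p.1 * W + p.2))
            PySem.Dict.empty F) =
          (List.foldl (fun d p => d.insert ((fun p => p) p) ((fun (p : Int × Int) => p.1 * W + p.2) p))
            PySem.Dict.empty F) from rfl, hthis]
      rw [show (PySem.Dict.empty (κ := Int × Int) (ν := Int)).items = [] from rfl,
        List.nil_append]
    have hvals : ((pvAll H W).foldl
        (fun d p => if pvVal g p.1 p.2 ≠ bgv then d.insert p (p.1 * W + p.2) else d)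
        PySem.Dict.empty).values = F.map (fun p => p.1 * W + p.2) := by
      have hv : ∀ (d : PySem.Dict (Int × Int) Int), d.values = d.items.map (fun x => x.2) :=
        fun _ => rfl
      rw [hv, h0items, List.map_map]
      exact List.map_congr_left (fun p _ => rfl)
    have hinv0 : pvLabInv g H W bg F (fun p => p.1 * W + p.2) :=
      fun p hp => ⟨p, hp, Relation.ReflTransGen.refl, rfl⟩
    have hfuel : (F.map (fun p => ((fun p : Int × Int => p.1 * W + p.2) p).toNat)).sum <
        (((pvAll H W).foldl
          (fun d p => if pvVal g p.1 p.2 ≠ bgv then d.insert p (p.1 * W + p.2) else d)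
          PySem.Dict.empty).values.map Int.toNat).sum + 1 := by
      rw [hvals, List.map_map]
      exact Nat.lt_succ_of_le (le_of_eq rfl)
    obtain ⟨ℓ, hLit, hLinv, hLfix⟩ := pvIterFix hF hFnd _ _ (fun p => p.1 * W + p.2)
      h0items hinv0 hfuel
    have hcls := pvClass hF hW hLinv hLfix
    -- A's components are the ℓ-classes of the recorded keys
    have hA := pvScanA g H W bg F ℓ hF hFnd hcls (pvAll H W) [] [] []
      (fun x hx => by
        simp only [pvInb, decide_eq_true_eq]
        exact mem_pvAll.mp hx)
      (by intro x _; simp)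
      (by intro c hc; simp at hc)
      List.Forall₂.nil
    have hAllfilter : (pvAll H W).filter (fun p => pvIsFg bg (pvVal g p.1 p.2)) = F := by
      rw [hFdef]
      exact List.filter_congr (fun x _ => hfgv (pvVal g x.1 x.2))
    rw [hAllfilter, PySem.Set.update_nil_left] at hA
    -- B's groups are the ℓ-classes of the same keys in the same order
    have hgv : ((pvIterLab
          ((((pvAll H W).foldl
              (fun d p => if pvVal g p.1 p.2 ≠ bgv then d.insert p (p.1 * W + p.2) else d)
              PySem.Dict.empty).values.map Int.toNat).sum + 1)
          ((pvAll H W).foldl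
              (fun d p => if pvVal g p.1 p.2 ≠ bgv then d.insert p (p.1 * W + p.2) else d)
              PySem.Dict.empty)).items.foldl
        (fun d x => d.modify x.2 [] (· ++ [x.1])) PySem.Dict.empty).values =
        (PySem.Set.ofList (F.map ℓ)).map (fun k => F.filter (fun p => ℓ p == k)) := by
      rw [hLit]
      have hkeys : ((F.map (fun p => (p, ℓ p))).foldl
          (fun d x => d.modify x.2 [] (· ++ [x.1])) PySem.Dict.empty).keys =
          PySem.Set.ofList (F.map ℓ) := by
        have := PySem.Dict.keys_foldl_modify_key (l := F.map (fun p => (p, ℓ p)))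
          (key := fun x => x.2) (d0 := ([] : List (Int × Int)))
          (f := fun _ x => (· ++ [x.1])) (d := PySem.Dict.empty)
        rw [this]
        rw [show (PySem.Dict.empty (κ := Int) (ν := List (Int × Int))).keys = [] from rfl,
          PySem.Set.update_nil_left, List.map_map]
        simp [Function.comp_def]
      have hknd : ((F.map (fun p => (p, ℓ p))).foldl
          (fun d x => d.modify x.2 [] (· ++ [x.1])) PySem.Dict.empty).keys.Nodup := by
        rw [hkeys]
        exact PySem.Set.nodup_ofList _
      rw [PySem.Dict.values_eq_map_keys _ hknd ([] : List (Int × Int)), hkeys]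
      apply List.map_congr_left
      intro k _
      -- the group at k is the ℓ-class of k
      have hfold : (F.map (fun p => (p, ℓ p))).foldl
          (fun d x => d.modify x.2 [] (· ++ [x.1])) PySem.Dict.empty =
          (F.map (fun p => (ℓ p, p))).foldl
          (fun d q => d.modify q.1 [] (· ++ [q.2])) PySem.Dict.empty := by
        rw [List.foldl_map, List.foldl_map]
      rw [hfold, PySem.Dict.getD_foldl_modify_append, List.filter_map]
      simp [Function.comp_def, List.map_map]
    rw [hgv]
    exact List.forall₂_map_right_iff.mpr hA

-- ===== VERDICT (by name: the statement is the Claim_ definition above) =====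
theorem translate_object_to_spec : Claim_equal_translate_object_to := by
  intro g dest bg _ _
  unfold Spec_translate_object_to translate_object_to translate_object_to_alt
  by_cases hg : g.length = 0 ∨ (g.headI).length = 0
  · rw [if_pos hg, if_pos hg]
  · rw [if_neg hg, if_neg hg]
    exact pvFinish_congr g dest _ _ _ (pvComps_rel g _)
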